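-- pv_equiv track=rewrite | github.com/Titanmodne/3d-print-software | deleteG0.py | remove_continuous_g0
-- ===== SOURCE A (Python) =====
-- def remove_continuous_g0(data):
--     """移除连续的 G0 指令"""
--     result = []
--     g0_lines = []  # 存储连续的 G0 指令
--
--     for line in data:
--         stripped_line = line.strip()
--         if stripped_line.startswith("G0"):
--             g0_lines.append(line)  # 收集 G0 指令
--         else:
--             # 处理前面的连续 G0 指令
--             if len(g0_lines) > 1:
--                 result.append(g0_lines[-1])  # 只保留最后一个 G0
--             elif len(g0_lines) == 1:
--                 result.append(g0_lines[0])  # 保留单个 G0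
--             g0_lines = []  # 重置 G0 列表
--             result.append(line)  # 添加当前行（可能是空行或非 G0 行）
--
--     # 处理数据块末尾的连续 G0
--     if len(g0_lines) > 1:
--         result.append(g0_lines[-1])  # 只保留最后一个 G0
--     elif len(g0_lines) == 1:
--         result.append(g0_lines[0])  # 保留单个 G0
--
--     return result
-- ===== SOURCE B (Python) =====
-- def remove_continuous_g0(data):
--     """移除连续的 G0 指令"""
--     lines = list(data)
--     out = []
--     for i, line in enumerate(lines):
--         if line.strip().startswith("G0") and i + 1 < len(lines) and lines[i + 1].strip().startswith("G0"):
--             continue  # a later G0 in the same run supersedes this one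
--         out.append(line)
--     return out
-- ===== Notes on version B (the rewrite author's own statement) =====
-- stated objective: simpler
-- what changed: Replaced A's run-buffer accumulator (collect consecutive G0 lines, flush last on boundary and at end) by a single forward-lookahead filter: keep a line unless it is a G0 line immediately followed by another G0 line.
import Mathlib
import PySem

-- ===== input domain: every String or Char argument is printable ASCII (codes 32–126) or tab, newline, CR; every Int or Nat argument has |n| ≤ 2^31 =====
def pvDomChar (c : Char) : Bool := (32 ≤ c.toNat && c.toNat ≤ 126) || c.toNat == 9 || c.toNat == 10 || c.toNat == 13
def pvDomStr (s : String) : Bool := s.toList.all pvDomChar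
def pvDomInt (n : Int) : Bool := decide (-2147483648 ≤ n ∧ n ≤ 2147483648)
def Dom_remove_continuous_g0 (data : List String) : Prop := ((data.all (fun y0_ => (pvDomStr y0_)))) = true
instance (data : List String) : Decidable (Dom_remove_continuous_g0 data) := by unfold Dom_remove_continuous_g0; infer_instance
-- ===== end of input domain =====

-- ===== PORT A =====
-- B replaces A's run-buffer accumulator by a forward-lookahead filter (objective: simpler).

-- line.strip().startswith("G0")
def isG0 (line : String) : Bool := PySem.Str.startswith (PySem.Str.strip line) "G0"

-- flush of A's pending g0_lines buffer at a run boundary / end of data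
def flushA (g0 : List String) : List String :=
  if 1 < g0.length then [g0.getLastD ""]
  else if g0.length = 1 then g0.take 1
  else []

-- the for-loop of A, carrying (result, g0_lines)
def aLoop (res : List String) (g0 : List String) : List String → List String
  | [] => res ++ flushA g0
  | line :: rest =>
      if isG0 line then aLoop res (g0 ++ [line]) rest
      else aLoop (res ++ flushA g0 ++ [line]) [] rest

def remove_continuous_g0 (data : List String) : List String := aLoop [] [] data

-- ===== PORT B =====
-- keep a line unless it is a G0 line whose immediate successor is also a G0 line
def remove_continuous_g0_alt : List String → List String
  | [] => []
  | [x] => [x]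
  | x :: y :: rest =>
      if isG0 x && isG0 y then remove_continuous_g0_alt (y :: rest)
      else x :: remove_continuous_g0_alt (y :: rest)

-- ===== PRECONDITION & SPEC =====
def Spec_remove_continuous_g0 (data : List String) (out : List String) : Prop := out = remove_continuous_g0_alt data
instance (data : List String) (out : List String) : Decidable (Spec_remove_continuous_g0 data out) := by unfold Spec_remove_continuous_g0; infer_instance

-- ===== CLAIM (what is proved, stated in full; the proofs are below) =====
def Claim_equal_remove_continuous_g0 : Prop := ∀ (data : List String), Dom_remove_continuous_g0 data → Spec_remove_continuous_g0 data (remove_continuous_g0 data)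

-- ===== LEMMAS AND PROOFS =====

theorem flushA_last (g0 : List String) (z : String) (h : g0.getLast? = some z) :
    flushA g0 = [z] := by
  cases g0 with
  | nil => simp at h
  | cons a t =>
    cases t with
    | nil => simp [List.getLast?] at h; simp [flushA, h]
    | cons b u =>
      unfold flushA
      have hlen : 1 < (a :: b :: u).length := by simp
      simp only [if_pos hlen]
      have : (a :: b :: u).getLastD "" = z := by
        rw [List.getLastD_eq_getLast?, h]; rfl
      rw [this]

theorem alt_cons_notG0 (x : String) (rest : List String) (hx : isG0 x = false) :
    remove_continuous_g0_alt (x :: rest) = x :: remove_continuous_g0_alt rest := by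
  cases rest with
  | nil => simp [remove_continuous_g0_alt]
  | cons y u => simp [remove_continuous_g0_alt, hx]

-- pending g0 run only matters through its last element
def altP (g0 : List String) (rest : List String) : List String :=
  match g0.getLast? with
  | none => remove_continuous_g0_alt rest
  | some z => remove_continuous_g0_alt (z :: rest)

theorem aLoop_eq_altP (rest : List String) : ∀ (res g0 : List String),
    (∀ x ∈ g0, isG0 x = true) → aLoop res g0 rest = res ++ altP g0 rest := by
  induction rest with
  | nil =>
    intro res g0 hg0
    unfold aLoop altP
    cases hz : g0.getLast? with
    | none =>
      have : g0 = [] := by cases g0 <;> simp_all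
      simp [this, flushA, remove_continuous_g0_alt]
    | some z =>
      rw [flushA_last g0 z hz]
      simp [remove_continuous_g0_alt]
  | cons line rest ih =>
    intro res g0 hg0
    unfold aLoop
    by_cases hl : isG0 line = true
    · simp only [hl, if_pos]
      have hg0' : ∀ x ∈ g0 ++ [line], isG0 x = true := by
        intro x hx
        rcases List.mem_append.1 hx with h | h
        · exact hg0 x h
        · simp at h; subst h; exact hl
      rw [ih res (g0 ++ [line]) hg0']
      unfold altP
      have h1 : (g0 ++ [line]).getLast? = some line := by simp
      rw [h1]
      cases hz : g0.getLast? with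
      | none => rfl
      | some z =>
        have hzmem : z ∈ g0 := List.mem_of_getLast? hz
        have hzG0 : isG0 z = true := hg0 z hzmem
        simp [remove_continuous_g0_alt, hzG0, hl]
    · rw [if_neg hl]
      rw [ih (res ++ flushA g0 ++ [line]) [] (by intro x hx; simp at hx)]
      unfold altP
      have hlf : isG0 line = false := by simpa using hl
      cases hz : g0.getLast? with
      | none =>
        have : g0 = [] := by cases g0 <;> simp_all
        simp [this, flushA, alt_cons_notG0 line rest hlf]
      | some z =>
        rw [flushA_last g0 z hz]
        have hzG0 : isG0 z = true := hg0 z (List.mem_of_getLast? hz)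
        show res ++ [z] ++ [line] ++ remove_continuous_g0_alt rest
            = res ++ remove_continuous_g0_alt (z :: line :: rest)
        rw [show remove_continuous_g0_alt (z :: line :: rest)
              = z :: remove_continuous_g0_alt (line :: rest) by
            simp [remove_continuous_g0_alt, hzG0, hlf]]
        rw [alt_cons_notG0 line rest hlf]
        simp

-- ===== VERDICT (by name: the statement is the Claim_ definition above) =====
theorem remove_continuous_g0_spec : Claim_equal_remove_continuous_g0 := by
  intro data _
  unfold Spec_remove_continuous_g0 remove_continuous_g0
  rw [aLoop_eq_altP data [] [] (by intro x hx; simp at hx)]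
  simp [altP]
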